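-- pv_equiv track=rewrite | github.com/ialab-puc/CuratorNet | src/main.py | hash_triple
-- ===== SOURCE A (Python) =====
-- def hash_triple(profile, pi, ni):
--     _MOD = 402653189
--     _BASE = 92821
--     h = 0
--     for x in profile:
--         h = ((h * _BASE) % _MOD + x) % _MOD
--     h = ((h * _BASE) % _MOD + pi) % _MOD
--     h = ((h * _BASE) % _MOD + ni) % _MOD
--     return h
-- ===== SOURCE B (Python) =====
-- def hash_triple(profile, pi, ni):
--     _MOD = 402653189
--     _BASE = 92821
--     values = list(profile) + [pi, ni]
--     total = 0
--     power = 1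
--     for x in reversed(values):
--         total += (x * power) % _MOD
--         power = (power * _BASE) % _MOD
--     return total % _MOD
-- ===== Notes on version B (the rewrite author's own statement) =====
-- stated objective: alternative
-- what changed: Replaces Horner's left-fold with per-step reduction by a reverse pass that accumulates positional weights BASE**d mod MOD and sums the weighted terms, reducing once at the end.
import Mathlib
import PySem

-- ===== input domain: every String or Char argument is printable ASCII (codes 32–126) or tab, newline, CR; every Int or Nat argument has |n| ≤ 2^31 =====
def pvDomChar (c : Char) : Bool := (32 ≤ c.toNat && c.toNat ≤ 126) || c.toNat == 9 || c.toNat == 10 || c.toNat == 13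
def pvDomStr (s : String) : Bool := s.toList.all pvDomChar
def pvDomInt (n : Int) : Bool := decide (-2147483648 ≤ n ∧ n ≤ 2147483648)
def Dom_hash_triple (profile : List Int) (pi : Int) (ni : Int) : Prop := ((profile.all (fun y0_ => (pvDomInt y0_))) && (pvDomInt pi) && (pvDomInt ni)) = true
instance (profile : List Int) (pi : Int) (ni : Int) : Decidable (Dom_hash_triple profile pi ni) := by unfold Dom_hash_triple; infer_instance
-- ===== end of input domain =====

-- B replaces A's Horner left-fold (reduce at every step) by a reverse pass over
-- profile + [pi, ni] that accumulates positional weights BASE**d mod MOD, sums the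
-- weighted terms, and reduces once at the end; same O(n) cost, different decomposition.

-- ===== PORT A =====
def hash_triple (profile : List Int) (pi : Int) (ni : Int) : Int :=
  let h : Int := profile.foldl
    (fun h x => PySem.Int.mod (PySem.Int.mod (h * 92821) 402653189 + x) 402653189) 0
  let h : Int := PySem.Int.mod (PySem.Int.mod (h * 92821) 402653189 + pi) 402653189
  PySem.Int.mod (PySem.Int.mod (h * 92821) 402653189 + ni) 402653189

-- ===== PORT B =====
def hash_triple_alt (profile : List Int) (pi : Int) (ni : Int) : Int :=
  let values : List Int := profile ++ [pi, ni]
  let s : Int × Int := values.reverse.foldl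
    (fun (tp : Int × Int) x =>
      (tp.1 + PySem.Int.mod (x * tp.2) 402653189, PySem.Int.mod (tp.2 * 92821) 402653189))
    (0, 1)
  PySem.Int.mod s.1 402653189

-- ===== PRECONDITION & SPEC =====
def Spec_hash_triple (profile : List Int) (pi : Int) (ni : Int) (out : Int) : Prop := out = hash_triple_alt profile pi ni
instance (profile : List Int) (pi : Int) (ni : Int) (out : Int) : Decidable (Spec_hash_triple profile pi ni out) := by unfold Spec_hash_triple; infer_instance

-- ===== CLAIM (what is proved, stated in full; the proofs are below) =====
def Claim_equal_hash_triple : Prop := ∀ (profile : List Int) (pi : Int) (ni : Int), Dom_hash_triple profile pi ni → Spec_hash_triple profile pi ni (hash_triple profile pi ni)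

-- ===== LEMMAS AND PROOFS =====

-- A's per-step state transition
def pvStepA (h x : Int) : Int :=
  PySem.Int.mod (PySem.Int.mod (h * 92821) 402653189 + x) 402653189

-- B's per-step state transition
def pvStepB (tp : Int × Int) (x : Int) : Int × Int :=
  (tp.1 + PySem.Int.mod (x * tp.2) 402653189, PySem.Int.mod (tp.2 * 92821) 402653189)

-- unreduced Horner fold
def pvHorner (h : Int) : List Int → Int
  | [] => h
  | x :: l => pvHorner (h * 92821 + x) l

-- unreduced little-endian polynomial value
def pvPoly : List Int → Int
  | [] => 0
  | x :: l => x + 92821 * pvPoly l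

theorem pvMod_eq (a : Int) : PySem.Int.mod a 402653189 = a % 402653189 :=
  PySem.Int.mod_eq_emod_of_pos (by norm_num)

theorem pvModEq_emod (a : Int) : a % 402653189 ≡ a [ZMOD 402653189] :=
  Int.emod_emod_of_dvd a dvd_rfl

theorem pvHorner_congr (l : List Int) : ∀ h h' : Int,
    h ≡ h' [ZMOD 402653189] → pvHorner h l ≡ pvHorner h' l [ZMOD 402653189] := by
  induction l with
  | nil => intro h h' hm; exact hm
  | cons x l ih =>
    intro h h' hm
    exact ih _ _ ((hm.mul_right 92821).add_right x)

theorem pvFoldA_emod (l : List Int) : ∀ h : Int,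
    (l.foldl pvStepA h) % 402653189 = (pvHorner h l) % 402653189 := by
  induction l with
  | nil => intro h; rfl
  | cons x l ih =>
    intro h
    have hstep : pvStepA h x ≡ h * 92821 + x [ZMOD 402653189] := by
      unfold pvStepA
      rw [pvMod_eq, pvMod_eq]
      exact (pvModEq_emod _).trans (((pvModEq_emod (h * 92821)).add_right x))
    calc ((x :: l).foldl pvStepA h) % 402653189
        = (l.foldl pvStepA (pvStepA h x)) % 402653189 := rfl
      _ = (pvHorner (pvStepA h x) l) % 402653189 := ih _
      _ = (pvHorner (h * 92821 + x) l) % 402653189 := pvHorner_congr l _ _ hstep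
      _ = (pvHorner h (x :: l)) % 402653189 := rfl

theorem pvFoldB_emod (l : List Int) : ∀ t p : Int,
    (l.foldl pvStepB (t, p)).1 ≡ t + p * pvPoly l [ZMOD 402653189] := by
  induction l with
  | nil => intro t p; simp [pvPoly]
  | cons x l ih =>
    intro t p
    have h1 : (x * p) % 402653189 ≡ x * p [ZMOD 402653189] := pvModEq_emod _
    have h2 : (p * 92821) % 402653189 ≡ p * 92821 [ZMOD 402653189] := pvModEq_emod _
    calc ((x :: l).foldl pvStepB (t, p)).1
        = (l.foldl pvStepB (t + (x * p) % 402653189, (p * 92821) % 402653189)).1 := by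
          simp [pvStepB]
      _ ≡ (t + (x * p) % 402653189) + ((p * 92821) % 402653189) * pvPoly l [ZMOD 402653189] := ih _ _
      _ ≡ (t + x * p) + (p * 92821) * pvPoly l [ZMOD 402653189] := (h1.add_left t).add (h2.mul_right _)
      _ = t + p * pvPoly (x :: l) := by simp [pvPoly]; ring

theorem pvPoly_append (l : List Int) (x : Int) :
    pvPoly (l ++ [x]) = pvPoly l + 92821 ^ l.length * x := by
  induction l with
  | nil => simp [pvPoly]
  | cons y l ih => simp [pvPoly, ih, pow_succ]; ring

theorem pvHorner_eq_poly_reverse (l : List Int) : ∀ h : Int,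
    pvHorner h l = pvPoly l.reverse + h * 92821 ^ l.length := by
  induction l with
  | nil => intro h; simp [pvHorner, pvPoly]
  | cons x l ih =>
    intro h
    calc pvHorner h (x :: l) = pvHorner (h * 92821 + x) l := rfl
      _ = pvPoly l.reverse + (h * 92821 + x) * 92821 ^ l.length := ih _
      _ = pvPoly (l.reverse ++ [x]) + h * 92821 ^ (x :: l).length := by
          rw [pvPoly_append]; simp [pow_succ]; ring
      _ = pvPoly (x :: l).reverse + h * 92821 ^ (x :: l).length := by simp

theorem pvStepA_emod_self (h x : Int) : pvStepA h x % 402653189 = pvStepA h x := by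
  unfold pvStepA
  rw [pvMod_eq, Int.emod_emod_of_dvd _ dvd_rfl]

theorem hash_triple_eq_fold (profile : List Int) (pi ni : Int) :
    hash_triple profile pi ni = (profile ++ [pi, ni]).foldl pvStepA 0 := by
  rw [List.foldl_append]
  rfl

-- ===== VERDICT (by name: the statement is the Claim_ definition above) =====
theorem hash_triple_spec : Claim_equal_hash_triple := by
  intro profile pi ni _
  unfold Spec_hash_triple
  have hB : hash_triple_alt profile pi ni
      = ((profile ++ [pi, ni]).reverse.foldl pvStepB (0, 1)).1 % 402653189 := by
    rw [← pvMod_eq]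
    rfl
  have hsplit : (profile ++ [pi, ni]).foldl pvStepA 0
      = pvStepA (pvStepA (profile.foldl pvStepA 0) pi) ni := by
    rw [List.foldl_append]
    rfl
  have hA' : ((profile ++ [pi, ni]).foldl pvStepA 0) % 402653189
      = (profile ++ [pi, ni]).foldl pvStepA 0 := by
    rw [hsplit, pvStepA_emod_self]
  have h2 : pvHorner 0 (profile ++ [pi, ni]) = pvPoly (profile ++ [pi, ni]).reverse := by
    rw [pvHorner_eq_poly_reverse]
    ring
  rw [hash_triple_eq_fold, hB, ← hA', pvFoldA_emod, h2]
  simpa using (pvFoldB_emod (profile ++ [pi, ni]).reverse 0 1).symm
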